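-- pv_equiv track=rewrite | github.com/giokezo/Letroso-Solver | engine.py | is_win_pattern
-- ===== SOURCE A (Python) =====
-- GREEN  = 2
--
-- BORDER = 3
--
-- _BASE = 8   # state*2 + concat_right  →  values 0–7
--
-- def is_win_pattern(pattern_int: int, length: int) -> bool:
--     """
--     True only for the exact win pattern  PO(GO)^N P:
--       - position 0        : BORDER, concat_right = True
--       - positions 1..L-2  : GREEN,  concat_right = True
--       - position L-1      : BORDER, concat_right = False
--
--     This means the guessed word spans the full target consecutively
--     from left border to right border (i.e. the guess IS the target).
--     Single-letter edge case: just BORDER with concat_right = False.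
--     """
--     if length == 1:
--         v = pattern_int % _BASE
--         return v // 2 == BORDER and not bool(v % 2)
--
--     for i in range(length):
--         v      = pattern_int % _BASE
--         state  = v // 2
--         concat = bool(v % 2)
--         if i == 0:
--             if state != BORDER or not concat:
--                 return False
--         elif i == length - 1:
--             if state != BORDER or concat:
--                 return False
--         else:
--             if state != GREEN or not concat:
--                 return False
--         pattern_int //= _BASE
--     return True
-- ===== SOURCE B (Python) =====
-- def is_win_pattern(pattern_int: int, length: int) -> bool:
--     # Closed form: compare pattern_int mod 8**length against the unique win value.
--     if length <= 0:
--         return True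
--     if length == 1:
--         return pattern_int % 8 == 6
--     # |pattern_int| < 8**(length-1): too few base-8 digits to carry the win value
--     if abs(pattern_int).bit_length() <= 3 * (length - 1):
--         return False
--     pw = 8 ** (length - 1)
--     expected = 7 + 6 * pw + 5 * (pw - 8) // 7
--     return pattern_int % (8 * pw) == expected
-- ===== Notes on version B (the rewrite author's own statement) =====
-- stated objective: alternative
-- what changed: Replaced the per-digit validation loop with a single modular comparison of pattern_int mod 8**length against the winning value computed in closed form (geometric sum), after a bit_length test rejects patterns with too few base-8 digits to match.
import Mathlib
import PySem

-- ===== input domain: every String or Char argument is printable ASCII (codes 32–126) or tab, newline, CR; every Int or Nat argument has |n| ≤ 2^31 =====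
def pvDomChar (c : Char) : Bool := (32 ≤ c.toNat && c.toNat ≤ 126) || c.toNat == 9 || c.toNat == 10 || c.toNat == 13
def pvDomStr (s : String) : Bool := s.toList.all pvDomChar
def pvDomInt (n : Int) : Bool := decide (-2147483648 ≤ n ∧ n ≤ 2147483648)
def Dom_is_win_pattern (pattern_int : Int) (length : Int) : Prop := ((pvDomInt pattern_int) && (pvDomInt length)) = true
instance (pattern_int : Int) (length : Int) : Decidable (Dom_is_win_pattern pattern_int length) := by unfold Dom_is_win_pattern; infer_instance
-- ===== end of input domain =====

-- B replaces A's per-digit validation loop by one modular comparison against the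
-- closed-form winning value (alternative decomposition, same exact behaviour).

-- ===== PORT A =====
-- A's 'for i in range(length)' with early 'return False', as a tail-recursive loop:
-- fuel counts the remaining iterations, i is the current index
def pvALoop (length : Int) (i : Int) (p : Int) : Nat → Bool
  | 0 => true
  | (fuel+1) =>
    let v := PySem.Int.mod p 8
    let state := PySem.Int.floordiv v 2
    let concat := decide (PySem.Int.mod v 2 ≠ 0)
    if i = 0 then
      if state ≠ 3 ∨ concat = false then false
      else pvALoop length (i+1) (PySem.Int.floordiv p 8) fuel
    else if i = length - 1 then
      if state ≠ 3 ∨ concat = true then false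
      else pvALoop length (i+1) (PySem.Int.floordiv p 8) fuel
    else
      if state ≠ 2 ∨ concat = false then false
      else pvALoop length (i+1) (PySem.Int.floordiv p 8) fuel

def is_win_pattern (pattern_int : Int) (length : Int) : Bool :=
  if length = 1 then
    let v := PySem.Int.mod pattern_int 8
    decide (PySem.Int.floordiv v 2 = 3) && !(decide (PySem.Int.mod v 2 ≠ 0))
  else
    pvALoop length 0 pattern_int length.toNat

-- ===== PORT B =====
def is_win_pattern_alt (pattern_int : Int) (length : Int) : Bool :=
  if length ≤ 0 then true
  else if length = 1 then decide (PySem.Int.mod pattern_int 8 = 6)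
  else if (PySem.Int.bitLength pattern_int : Int) ≤ 3 * (length - 1) then false
  else
    let pw : Int := 8 ^ (length - 1).toNat
    let expected := 7 + 6 * pw + PySem.Int.floordiv (5 * (pw - 8)) 7
    decide (PySem.Int.mod pattern_int (8 * pw) = expected)

-- ===== PRECONDITION & SPEC =====
def Spec_is_win_pattern (pattern_int : Int) (length : Int) (out : Bool) : Prop := out = is_win_pattern_alt pattern_int length
instance (pattern_int : Int) (length : Int) (out : Bool) : Decidable (Spec_is_win_pattern pattern_int length out) := by unfold Spec_is_win_pattern; infer_instance

-- ===== CLAIM (what is proved, stated in full; the proofs are below) =====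
def Claim_equal_is_win_pattern : Prop := ∀ (pattern_int : Int) (length : Int), Dom_is_win_pattern pattern_int length → Spec_is_win_pattern pattern_int length (is_win_pattern pattern_int length)

-- ===== LEMMAS AND PROOFS =====

-- the tail of the win value: base-8 digits 5,5,…,5,6 (m digits, least significant first)
def tailExp : Nat → Int
  | 0 => 0
  | 1 => 6
  | (m+2) => 5 + 8 * tailExp (m+1)

lemma tailExp_succ (m : Nat) (hm : 1 ≤ m) : tailExp (m+1) = 5 + 8 * tailExp m := by
  cases m with
  | zero => omega
  | succ k => rfl

-- the loop body, condensed: each position demands one exact digit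
lemma pvALoop_succ (L i p : Int) (fuel : Nat) :
    pvALoop L i p (fuel+1) =
      if i = 0 then
        (if p % 8 = 7 then pvALoop L (i+1) (p / 8) fuel else false)
      else if i = L - 1 then
        (if p % 8 = 6 then pvALoop L (i+1) (p / 8) fuel else false)
      else
        (if p % 8 = 5 then pvALoop L (i+1) (p / 8) fuel else false) := by
  have hmod := PySem.Int.mod_eq_emod_of_pos (a := p) (b := 8) (by norm_num)
  have hv1 : 0 ≤ p % 8 := Int.emod_nonneg p (by norm_num)
  have hv2 : p % 8 < 8 := Int.emod_lt_of_pos p (by norm_num)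
  have hdiv := PySem.Int.floordiv_eq_ediv_of_pos (a := p % 8) (b := 2) (by norm_num)
  have hmod2 := PySem.Int.mod_eq_emod_of_pos (a := p % 8) (b := 2) (by norm_num)
  have hdiv8 := PySem.Int.floordiv_eq_ediv_of_pos (a := p) (b := 8) (by norm_num)
  conv_lhs => rw [pvALoop]
  simp only [hmod, hdiv, hmod2, hdiv8, ne_eq, decide_eq_false_iff_not,
    decide_eq_true_eq, Decidable.not_not]
  split_ifs <;> first | rfl | omega

-- digit split: p mod 8c = (p mod 8) + 8 * ((p / 8) mod c)  for 0 < c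
lemma emod_split (p c : Int) (hc : 0 < c) :
    p % (8 * c) = p % 8 + 8 * ((p / 8) % c) := by
  have hr1 : 0 ≤ p % 8 := Int.emod_nonneg p (by norm_num)
  have hr2 : p % 8 < 8 := Int.emod_lt_of_pos p (by norm_num)
  have hs1 : 0 ≤ (p / 8) % c := Int.emod_nonneg _ (by omega)
  have hs2 : (p / 8) % c < c := Int.emod_lt_of_pos _ hc
  have e1 : p = 8 * (p / 8) + p % 8 := by omega
  have e2 : p / 8 = c * ((p / 8) / c) + (p / 8) % c := by
    have := Int.emod_add_mul_ediv (p / 8) c; linarith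
  have hp : p = (p % 8 + 8 * ((p / 8) % c)) + (8 * c) * ((p / 8) / c) := by
    conv_lhs => rw [e1, e2]
    ring
  have hb1 : 0 ≤ p % 8 + 8 * ((p / 8) % c) := by omega
  have hb2 : p % 8 + 8 * ((p / 8) % c) < 8 * c := by nlinarith
  calc p % (8 * c)
      = ((p % 8 + 8 * ((p / 8) % c)) + (8 * c) * ((p / 8) / c)) % (8 * c) := by
        conv_lhs => rw [hp]
    _ = (p % 8 + 8 * ((p / 8) % c)) % (8 * c) := by rw [Int.add_mul_emod_self_left]
    _ = p % 8 + 8 * ((p / 8) % c) := Int.emod_eq_of_lt hb1 hb2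

lemma pow_pos8 (m : Nat) : (0:Int) < 8 ^ m := pow_pos (by norm_num) m

-- tail loop characterization: positions L-m .. L-1 succeed iff the low m digits are 5…5,6
lemma tail_char (L : Int) : ∀ (m : Nat) (p : Int), 1 ≤ m → (1:Int) ≤ L - m →
    pvALoop L (L - m) p m = decide (p % (8 ^ m) = tailExp m) := by
  intro m
  induction m with
  | zero => omega
  | succ m ih =>
    intro p _ hLm
    by_cases hm : m = 0
    · subst hm
      have e1 : L - ((0:Nat)+1 : Nat) = L - 1 := by push_cast; ring
      rw [e1] at hLm ⊢
      rw [pvALoop_succ, if_neg (by omega : ¬ (L - 1 = 0)), if_pos rfl]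
      by_cases h6 : p % 8 = 6
      · rw [if_pos h6]; simp [pvALoop, pow_one, tailExp, h6]
      · rw [if_neg h6]; simp [pow_one, tailExp, h6]
    · have hm1 : 1 ≤ m := by omega
      have hLm2 : (1:Int) ≤ L - m := by push_cast at hLm ⊢; omega
      rw [pvALoop_succ,
        if_neg (by push_cast at hLm ⊢; omega : ¬ (L - ((m:Nat)+1 : Nat) = 0)),
        if_neg (by push_cast; omega : ¬ (L - ((m:Nat)+1 : Nat) = L - 1))]
      have hsplit := emod_split p (8 ^ m) (pow_pos8 m)
      have hpow : (8:Int) * 8 ^ m = 8 ^ (m+1) := (pow_succ' 8 m).symm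
      have htail := tailExp_succ m hm1
      have hv1 : 0 ≤ p % 8 := Int.emod_nonneg p (by norm_num)
      have hv2 : p % 8 < 8 := Int.emod_lt_of_pos p (by norm_num)
      by_cases h5 : p % 8 = 5
      · rw [if_pos h5, show L - ((m:Nat)+1 : Nat) + 1 = L - (m:Nat) from by push_cast; ring,
          ih (p / 8) hm1 hLm2]
        refine (decide_eq_decide).mpr ?_
        rw [htail, ← hpow]
        constructor
        · intro hX; rw [hsplit, h5, hX]
        · intro hY; rw [hsplit] at hY; omega
      · rw [if_neg h5]
        have : ¬ (p % 8 ^ (m+1) = tailExp (m+1)) := by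
          rw [htail, ← hpow, hsplit]; omega
        simp [this]

-- one-digit case: v//2 == 3 and not v%2  ⟺  v == 6
lemma one_digit (p : Int) :
    (decide (PySem.Int.floordiv (PySem.Int.mod p 8) 2 = 3) &&
      !(decide (PySem.Int.mod (PySem.Int.mod p 8) 2 ≠ 0)))
      = decide (PySem.Int.mod p 8 = 6) := by
  have hmod := PySem.Int.mod_eq_emod_of_pos (a := p) (b := 8) (by norm_num)
  have hv1 : 0 ≤ p % 8 := Int.emod_nonneg p (by norm_num)
  have hv2 : p % 8 < 8 := Int.emod_lt_of_pos p (by norm_num)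
  have hdiv := PySem.Int.floordiv_eq_ediv_of_pos (a := p % 8) (b := 2) (by norm_num)
  have hmod2 := PySem.Int.mod_eq_emod_of_pos (a := p % 8) (b := 2) (by norm_num)
  rw [hmod, hdiv, hmod2]
  by_cases h : p % 8 = 6
  · simp [h]
  · simp only [h, decide_false]
    simp only [Bool.and_eq_false_iff, decide_eq_false_iff_not, Bool.not_eq_false',
      decide_eq_true_eq]
    omega

-- the closed-form tail value used by B equals tailExp
lemma tail_closed (m : Nat) (hm : 1 ≤ m) :
    PySem.Int.floordiv (5 * (8 ^ m - 8)) 7 = 8 * tailExp m - 6 * 8 ^ m := by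
  have key : ∀ k : Nat, 1 ≤ k → 7 * (8 * tailExp k - 6 * 8 ^ k) = 5 * (8 ^ k - 8) := by
    intro k hk
    induction k with
    | zero => omega
    | succ k ih =>
      cases Nat.eq_or_lt_of_le hk with
      | inl h => simp [← h, tailExp]
      | inr h =>
        have hk1 : 1 ≤ k := by omega
        rw [tailExp_succ k hk1, pow_succ]
        nlinarith [ih hk1]
  rw [PySem.Int.floordiv_eq_ediv_of_pos (by norm_num : (0:Int) < 7), ← key m hm,
    Int.mul_ediv_cancel_left _ (by norm_num)]

lemma tailExp_lb (m : Nat) (hm : 1 ≤ m) : 6 * 8 ^ (m-1) ≤ tailExp m := by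
  induction m with
  | zero => omega
  | succ m ih =>
    cases Nat.eq_or_lt_of_le hm with
    | inl h => simp [← h, tailExp]
    | inr h =>
      have hm1 : 1 ≤ m := by omega
      have := ih hm1
      rw [tailExp_succ m hm1, show m + 1 - 1 = (m-1)+1 from by omega, pow_succ]
      nlinarith [this]

lemma tailExp_ub (m : Nat) (hm : 1 ≤ m) : tailExp m ≤ 7 * 8 ^ (m-1) - 1 := by
  induction m with
  | zero => omega
  | succ m ih =>
    cases Nat.eq_or_lt_of_le hm with
    | inl h => simp [← h, tailExp]
    | inr h =>
      have hm1 : 1 ≤ m := by omega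
      have := ih hm1
      rw [tailExp_succ m hm1, show m + 1 - 1 = (m-1)+1 from by omega, pow_succ]
      nlinarith [this]

-- ===== VERDICT (by name: the statement is the Claim_ definition above) =====
theorem is_win_pattern_spec : Claim_equal_is_win_pattern := by
  intro p L _
  show is_win_pattern p L = is_win_pattern_alt p L
  by_cases h1 : L = 1
  · subst h1
    rw [is_win_pattern, is_win_pattern_alt, if_pos rfl,
      if_neg (by norm_num : ¬ (1:Int) ≤ 0), if_pos rfl]
    exact one_digit p
  by_cases h0 : L ≤ 0
  · rw [is_win_pattern, is_win_pattern_alt, if_neg h1, if_pos h0,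
      show L.toNat = 0 from by omega]
    rfl
  · -- L ≥ 2
    have hL2 : 2 ≤ L := by omega
    set n : Nat := L.toNat with hn
    have hLn : L = (n:Int) := by omega
    have hn2 : 2 ≤ n := by omega
    have htn : (L - 1).toNat = n - 1 := by omega
    have hm1 : 1 ≤ n - 1 := by omega
    have hsplit := emod_split p (8 ^ (n-1)) (pow_pos8 (n-1))
    have hv1 : 0 ≤ p % 8 := Int.emod_nonneg p (by norm_num)
    have hv2 : p % 8 < 8 := Int.emod_lt_of_pos p (by norm_num)
    have hA : pvALoop L 0 p ((n-1)+1) = decide (p % (8 * 8 ^ (n-1)) = 7 + 8 * tailExp (n-1)) := by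
      rw [pvALoop_succ, if_pos rfl]
      by_cases h7 : p % 8 = 7
      · rw [if_pos h7, show (0:Int) + 1 = L - ((n-1 : Nat) : Int) from by omega,
          tail_char L (n-1) (p / 8) hm1 (by omega)]
        refine (decide_eq_decide).mpr ?_
        rw [hsplit]
        constructor
        · intro hX; rw [h7, hX]
        · intro hY; omega
      · rw [if_neg h7]
        have : ¬ (p % (8 * 8 ^ (n-1)) = 7 + 8 * tailExp (n-1)) := by
          rw [hsplit]; omega
        simp [this]
    rw [is_win_pattern, is_win_pattern_alt, if_neg h1, if_neg h0, if_neg h1]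
    rw [show L.toNat = (n-1)+1 from by omega, hA]
    have hTlb := tailExp_lb (n-1) hm1
    have hTub := tailExp_ub (n-1) hm1
    have hy : (0:Int) < 8 ^ (n-1-1) := pow_pos8 (n-1-1)
    have hy8 : (8:Int) ^ (n-1) = 8 * 8 ^ (n-1-1) := by
      conv_lhs => rw [show n-1 = (n-1-1)+1 from by omega]
      rw [pow_succ]; ring
    by_cases hg : (PySem.Int.bitLength p : Int) ≤ 3 * (L - 1)
    · rw [if_pos hg]
      have hbl : PySem.Int.bitLength p ≤ 3 * (n - 1) := by
        rw [hLn] at hg; omega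
      have h2p := PySem.Int.lt_two_pow_bitLength p
      have hnat : p.natAbs < 8 ^ (n-1) := by
        calc p.natAbs < 2 ^ PySem.Int.bitLength p := h2p
          _ ≤ 2 ^ (3 * (n-1)) := Nat.pow_le_pow_right (by norm_num) hbl
          _ = 8 ^ (n-1) := by rw [pow_mul]; norm_num
      have hc8 : (((8:Nat) ^ (n-1) : Nat) : Int) = (8:Int) ^ (n-1) := by push_cast; ring
      have habs : -(8:Int) ^ (n-1) < p ∧ p < 8 ^ (n-1) := by omega
      have hne : ¬ (p % (8 * 8 ^ (n-1)) = 7 + 8 * tailExp (n-1)) := by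
        rcases lt_or_ge p 0 with hp0 | hp0
        · have hmodp : p % (8 * 8 ^ (n-1)) = p + 8 * 8 ^ (n-1) := by
            have e : p % (8 * 8 ^ (n-1)) = (p + (8 * 8 ^ (n-1)) * 1) % (8 * 8 ^ (n-1)) := by
              rw [Int.add_mul_emod_self_left]
            rw [e, mul_one]
            exact Int.emod_eq_of_lt (by nlinarith [pow_pos8 (n-1)]) (by omega)
          rw [hmodp, hy8] at *
          intro h; omega
        · have hmodp : p % (8 * 8 ^ (n-1)) = p :=
            Int.emod_eq_of_lt hp0 (by nlinarith [pow_pos8 (n-1)])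
          rw [hmodp, hy8] at *
          intro h; omega
      simp [hne]
    · rw [if_neg hg]
      show _ = decide (PySem.Int.mod p (8 * 8 ^ ((L-1).toNat)) =
        7 + 6 * (8:Int) ^ ((L-1).toNat) + PySem.Int.floordiv (5 * ((8:Int) ^ ((L-1).toNat) - 8)) 7)
      have hmodB := PySem.Int.mod_eq_emod_of_pos (a := p) (b := 8 * 8 ^ ((L-1).toNat))
        (by positivity)
      rw [hmodB, htn, tail_closed (n-1) hm1,
        show 7 + 6 * (8:Int) ^ (n-1) + (8 * tailExp (n-1) - 6 * 8 ^ (n-1))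
          = 7 + 8 * tailExp (n-1) from by ring]
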